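-- pv_equiv track=rewrite | github.com/DennieCodes/python-exploration | python-functions/calculate_num_letters.py | calculate_num_letters
-- ===== SOURCE A (Python) =====
-- def calculate_num_letters(num_pushes):
--     display_string = ["X"]
--
--     for num in range(1, num_pushes): # start at one with default X
--         working_string = []
--         for char in display_string:
--             if char == "X":
--                 working_string.append("O")
--             else:
--                 working_string.append("O")
--                 working_string.append("X")
--             pass
--         display_string = working_string
--
--     exes = ''.join(display_string).count("X")
--     os = ''.join(display_string).count("O")
--
--     return (exes, os)
-- ===== SOURCE B (Python) =====
-- def calculate_num_letters(num_pushes):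
--     # Linear recurrence on the (X, O) counts: each push maps X -> O and O -> OX,
--     # so new_x = o and new_o = x + o; no string is ever built.
--     exes, os = 1, 0
--     for _ in range(1, num_pushes):
--         exes, os = os, exes + os
--     return (exes, os)
-- ===== Notes on version B (the rewrite author's own statement) =====
-- stated objective: faster
-- what changed: B tracks only the pair of letter counts through the linear recurrence (x,o) -> (o,x+o) instead of materialising the exponentially growing substitution string and counting its characters; intended as faster (A's string doubles roughly every push), measured 26.8x at the largest size where both finished (A timed out beyond that).
import Mathlib
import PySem

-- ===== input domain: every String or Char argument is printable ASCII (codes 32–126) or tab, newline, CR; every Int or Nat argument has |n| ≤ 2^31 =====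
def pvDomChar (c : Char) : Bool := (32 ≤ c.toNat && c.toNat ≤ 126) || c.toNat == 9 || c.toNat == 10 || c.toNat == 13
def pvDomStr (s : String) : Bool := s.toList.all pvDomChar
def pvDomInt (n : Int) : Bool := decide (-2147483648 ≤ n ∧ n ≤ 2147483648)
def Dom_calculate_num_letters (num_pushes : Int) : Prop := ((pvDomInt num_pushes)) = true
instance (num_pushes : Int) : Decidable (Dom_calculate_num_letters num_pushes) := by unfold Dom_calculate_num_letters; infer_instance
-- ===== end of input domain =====

-- B replaces A's exponentially growing string substitution by the linear recurrence
-- (x, o) -> (o, x + o) on the two letter counts; intended as faster (timing run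
-- measured 26.8x at the largest size where both finished; A timed out beyond that).

-- ===== PORT A =====
def calculate_num_letters (num_pushes : Int) : List Int :=
  let display_string : List String :=
    (PySem.List.pyRange 1 num_pushes 1).foldl
      (fun display_string _ =>
        display_string.foldl
          (fun working_string char =>
            if char = "X" then working_string ++ ["O"]
            else working_string ++ ["O", "X"])
          [])
      ["X"]
  let exes : Int := (PySem.Str.count (PySem.Str.join "" display_string) "X" : Int)
  let os : Int := (PySem.Str.count (PySem.Str.join "" display_string) "O" : Int)
  [exes, os]

-- ===== PORT B =====
def calculate_num_letters_alt (num_pushes : Int) : List Int :=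
  let p : Int × Int :=
    (PySem.List.pyRange 1 num_pushes 1).foldl
      (fun (p : Int × Int) _ => (p.2, p.1 + p.2)) (1, 0)
  [p.1, p.2]

-- ===== PRECONDITION & SPEC =====
def Spec_calculate_num_letters (num_pushes : Int) (out : List Int) : Prop := out = calculate_num_letters_alt num_pushes
instance (num_pushes : Int) (out : List Int) : Decidable (Spec_calculate_num_letters num_pushes out) := by unfold Spec_calculate_num_letters; infer_instance

-- ===== CLAIM (what is proved, stated in full; the proofs are below) =====
def Claim_equal_calculate_num_letters : Prop := ∀ (num_pushes : Int), Dom_calculate_num_letters num_pushes → Spec_calculate_num_letters num_pushes (calculate_num_letters num_pushes)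

-- ===== LEMMAS AND PROOFS =====

-- One substitution pass of A, written as the flatMap its append-fold computes.
def pvStep (s : List String) : List String :=
  s.flatMap (fun char => if char = "X" then ["O"] else ["O", "X"])

lemma pvStep_eq (s : List String) :
    s.foldl (fun working_string char =>
        if char = "X" then working_string ++ ["O"]
        else working_string ++ ["O", "X"]) [] = pvStep s := by
  have h1 : s.foldl (fun working_string char =>
        if char = "X" then working_string ++ ["O"]
        else working_string ++ ["O", "X"]) []
      = s.foldl (fun w (c : String) => w ++ (if c = "X" then ["O"] else ["O", "X"])) [] := by
    apply PySem.List.foldl_congr_mem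
    intro acc x _
    by_cases hx : x = "X" <;> simp [hx]
  rw [h1, PySem.List.foldl_append_eq_flatMap (fun c : String => if c = "X" then ["O"] else ["O", "X"]) s []]
  rfl

lemma pvStep_all (s : List String) (h : ∀ c ∈ s, c = "X" ∨ c = "O") :
    ∀ c ∈ pvStep s, c = "X" ∨ c = "O" := by
  intro c hc
  simp only [pvStep, List.mem_flatMap] at hc
  obtain ⟨a, _, hca⟩ := hc
  by_cases ha : a = "X" <;> simp [ha] at hca <;> tauto

lemma pvStep_countX (s : List String) (h : ∀ c ∈ s, c = "X" ∨ c = "O") :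
    (pvStep s).count "X" = s.count "O" := by
  induction s with
  | nil => simp [pvStep]
  | cons a t ih =>
    have ih' := ih (fun c hc => h c (by simp [hc]))
    simp only [pvStep] at ih' ⊢
    rcases h a (by simp) with ha | ha <;> subst ha <;> simp [ih']

lemma pvStep_countO (s : List String) (h : ∀ c ∈ s, c = "X" ∨ c = "O") :
    (pvStep s).count "O" = s.count "X" + s.count "O" := by
  induction s with
  | nil => simp [pvStep]
  | cons a t ih =>
    have ih' := ih (fun c hc => h c (by simp [hc]))
    simp only [pvStep] at ih' ⊢
    rcases h a (by simp) with ha | ha <;> subst ha <;> simp [ih'] <;> omega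

-- Joint loop invariant: B's pair is exactly the pair of letter counts of A's list.
lemma pvLoop_inv (L : List Int) (s : List String) (h : ∀ c ∈ s, c = "X" ∨ c = "O") :
    (∀ c ∈ L.foldl (fun d _ => pvStep d) s, c = "X" ∨ c = "O") ∧
    L.foldl (fun (p : Int × Int) _ => (p.2, p.1 + p.2))
        ((s.count "X" : Int), (s.count "O" : Int)) =
      (((L.foldl (fun d _ => pvStep d) s).count "X" : Int),
       ((L.foldl (fun d _ => pvStep d) s).count "O" : Int)) := by
  induction L generalizing s with
  | nil => exact ⟨h, rfl⟩
  | cons a t ih =>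
    have h' := pvStep_all s h
    have hrec := ih (pvStep s) h'
    simp only [List.foldl_cons]
    rw [show ((((s.count "X" : Nat) : Int), ((s.count "O" : Nat) : Int)).2,
          (((s.count "X" : Nat) : Int), ((s.count "O" : Nat) : Int)).1 +
          (((s.count "X" : Nat) : Int), ((s.count "O" : Nat) : Int)).2) =
        ((((pvStep s).count "X" : Nat) : Int), (((pvStep s).count "O" : Nat) : Int)) by
      simp only [pvStep_countX s h, pvStep_countO s h, Prod.mk.injEq]
      constructor <;> push_cast <;> ring]
    exact hrec

-- str.count with a single-character needle is the per-element list count (worker first).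
lemma pvCount_go_singleton (c : Char) (l : List Char) (fuel acc : Nat)
    (hf : l.length ≤ fuel) :
    PySem.Chars.count.go [c] fuel l acc = acc + l.count c := by
  induction l generalizing fuel acc with
  | nil => cases fuel <;> simp [PySem.Chars.count.go]
  | cons a t ih =>
    cases fuel with
    | zero => simp at hf
    | succ n =>
      have hn : t.length ≤ n := by simpa using hf
      by_cases hac : c = a
      · subst hac
        rw [show PySem.Chars.count.go [c] (n+1) (c :: t) acc
              = PySem.Chars.count.go [c] n t (acc + 1) by
            simp [PySem.Chars.count.go, List.isPrefixOf]]
        rw [ih n (acc+1) hn]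
        simp
        omega
      · rw [show PySem.Chars.count.go [c] (n+1) (a :: t) acc
              = PySem.Chars.count.go [c] n t acc by
            simp [PySem.Chars.count.go, List.isPrefixOf, hac]]
        rw [ih n acc hn]
        simp [Ne.symm hac]

lemma pvCount_singleton (cs : List Char) (c : Char) :
    PySem.Chars.count cs [c] = cs.count c := by
  simpa [PySem.Chars.count] using pvCount_go_singleton c cs cs.length 0 le_rfl

-- ''.join of a list of "X"/"O" strings, counted per character, is the list count.
lemma pvJoin_count (s : List String) (h : ∀ c ∈ s, c = "X" ∨ c = "O") (c : Char) :
    (PySem.Chars.join [] (s.map String.toList)).count c = s.count (String.ofList [c]) := by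
  induction s with
  | nil => simp [PySem.Chars.join_nil]
  | cons a t ih =>
    have ih' := ih (fun x hx => h x (by simp [hx]))
    cases t with
    | nil =>
      rcases h a (by simp) with ha | ha <;> subst ha <;>
        simp [PySem.Chars.join_singleton, List.count_cons, List.count_nil, String.ext_iff] <;>
        rcases eq_or_ne c 'X' with hc | hc <;> rcases eq_or_ne c 'O' with hc2 | hc2 <;>
        simp_all [String.ext_iff] <;> simp [List.count_cons, String.ext_iff]
    | cons b u =>
      rw [List.map_cons, List.map_cons, PySem.Chars.join_cons_cons, ← List.map_cons]
      rcases h a (by simp) with ha | ha <;> subst ha <;>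
        simp [List.count_append, List.count_cons, ih'] <;>
        rcases eq_or_ne c 'X' with hc | hc <;> rcases eq_or_ne c 'O' with hc2 | hc2 <;>
        simp_all [String.ext_iff] <;> simp [List.count_cons, String.ext_iff]

lemma pvStrCount (s : List String) (h : ∀ c ∈ s, c = "X" ∨ c = "O") (c : Char) :
    PySem.Str.count (PySem.Str.join "" s) (String.ofList [c]) = s.count (String.ofList [c]) := by
  rw [PySem.Str.count_eq, PySem.Str.toList_join]
  rw [show ("" : String).toList = [] from rfl,
      show (String.ofList [c]).toList = [c] by simp,
      pvCount_singleton, pvJoin_count s h c]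

-- ===== VERDICT (by name: the statement is the Claim_ definition above) =====
theorem calculate_num_letters_spec : Claim_equal_calculate_num_letters := by
  intro n _
  unfold Spec_calculate_num_letters calculate_num_letters calculate_num_letters_alt
  have hA : (PySem.List.pyRange 1 n 1).foldl
      (fun display_string _ =>
        display_string.foldl
          (fun working_string char =>
            if char = "X" then working_string ++ ["O"]
            else working_string ++ ["O", "X"]) [])
      ["X"]
      = (PySem.List.pyRange 1 n 1).foldl (fun d _ => pvStep d) ["X"] := by
    apply PySem.List.foldl_congr_mem
    intro d a _
    exact pvStep_eq d
  have hall : ∀ c ∈ (["X"] : List String), c = "X" ∨ c = "O" := by simp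
  have hinv := pvLoop_inv (PySem.List.pyRange 1 n 1) ["X"] hall
  set final := (PySem.List.pyRange 1 n 1).foldl (fun d _ => pvStep d) ["X"] with hfinal
  have hcX := pvStrCount final hinv.1 'X'
  have hcO := pvStrCount final hinv.1 'O'
  rw [show String.ofList ['X'] = "X" from rfl] at hcX
  rw [show String.ofList ['O'] = "O" from rfl] at hcO
  have hB := hinv.2
  rw [show ((List.count "X" ["X"] : Int), (List.count "O" ["X"] : Int)) = ((1 : Int), (0 : Int)) by decide] at hB
  simp only [hA, hB, hcX, hcO]
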